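-- pv_equiv track=rewrite | github.com/Vibrane/SudokuSolver | sudoku.py | find_spot_with_multiple_candidates
-- ===== SOURCE A (Python) =====
-- def find_spot_with_multiple_candidates(domain):
--     x = []
--     y = []
--     for spot in domain:
--         length = len(domain[spot])
--         if length > 1:
--             x.append(spot)
--             y.append(length)
--     if len(x) == 0:
--         return None
--     else:
--         index = y.index(min(y))
--         return x[index]
-- ===== SOURCE B (Python) =====
-- def find_spot_with_multiple_candidates(domain):
--     best_spot = None
--     best_length = None
--     for spot in domain:
--         length = len(domain[spot])
--         if length <= 1:
--             continue
--         if best_spot is None or length < best_length: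
--             best_spot = spot
--             best_length = length
--     return best_spot
-- ===== Notes on version B (the rewrite author's own statement) =====
-- stated objective: simpler
-- what changed: Replaced the two intermediate parallel lists plus min/index/subscript post-processing by a single pass that keeps the current best spot and its candidate count, with strict '<' so the first spot achieving the minimum wins.
import Mathlib
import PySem

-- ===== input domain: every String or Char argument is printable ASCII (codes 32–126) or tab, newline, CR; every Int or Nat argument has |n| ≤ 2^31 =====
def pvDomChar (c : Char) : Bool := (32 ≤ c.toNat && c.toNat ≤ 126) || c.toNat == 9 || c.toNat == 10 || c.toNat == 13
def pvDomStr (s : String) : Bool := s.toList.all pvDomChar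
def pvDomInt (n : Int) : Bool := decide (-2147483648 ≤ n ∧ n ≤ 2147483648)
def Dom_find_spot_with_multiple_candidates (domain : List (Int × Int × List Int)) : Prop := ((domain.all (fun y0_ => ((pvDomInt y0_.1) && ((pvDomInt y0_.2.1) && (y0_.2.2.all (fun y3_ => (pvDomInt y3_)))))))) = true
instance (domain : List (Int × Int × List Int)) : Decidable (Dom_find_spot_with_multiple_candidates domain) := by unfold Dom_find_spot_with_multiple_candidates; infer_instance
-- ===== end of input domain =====

-- B keeps the single best spot in one pass (O(1) extra space) instead of A's two parallel lists plus min/index/subscript; return value only, no mutation.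
-- ===== PORT A =====
def find_spot_with_multiple_candidates (domain : List (Int × Int × List Int)) : Option (Int × Int) :=
  let xy := domain.foldl
    (fun (acc : List (Int × Int) × List Int) spot =>
      let length : Int := (spot.2.2.length : Int)
      if length > 1 then (acc.1 ++ [(spot.1, spot.2.1)], acc.2 ++ [length]) else acc)
    ([], [])
  if xy.1.length = 0 then none
  else
    match PySem.List.min? xy.2 (fun v => v) with
    | none => none
    | some m =>
      match PySem.List.index? xy.2 m with
      | none => none
      | some index => PySem.List.pyGet? xy.1 (index : Int)

-- ===== PORT B =====
def find_spot_with_multiple_candidates_alt (domain : List (Int × Int × List Int)) : Option (Int × Int) :=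
  (domain.foldl
    (fun (best : Option ((Int × Int) × Int)) spot =>
      let length : Int := (spot.2.2.length : Int)
      if length ≤ 1 then best
      else
        match best with
        | none => some ((spot.1, spot.2.1), length)
        | some b => if length < b.2 then some ((spot.1, spot.2.1), length) else best)
    none).map Prod.fst

-- ===== PRECONDITION & SPEC =====
def Spec_find_spot_with_multiple_candidates (domain : List (Int × Int × List Int)) (out : Option (Int × Int)) : Prop := out = find_spot_with_multiple_candidates_alt domain
instance (domain : List (Int × Int × List Int)) (out : Option (Int × Int)) : Decidable (Spec_find_spot_with_multiple_candidates domain out) := by unfold Spec_find_spot_with_multiple_candidates; infer_instance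

-- ===== CLAIM (what is proved, stated in full; the proofs are below) =====
def Claim_equal_find_spot_with_multiple_candidates : Prop := ∀ (domain : List (Int × Int × List Int)), Dom_find_spot_with_multiple_candidates domain → Spec_find_spot_with_multiple_candidates domain (find_spot_with_multiple_candidates domain)

-- ===== LEMMAS AND PROOFS =====

-- qualifying entries of the domain, as (spot, candidate-count) pairs
def pvPairs (d : List (Int × Int × List Int)) : List ((Int × Int) × Int) :=
  (d.filter (fun e => decide ((1:Int) < (e.2.2.length : Int)))).map
    (fun e => ((e.1, e.2.1), (e.2.2.length : Int)))

-- first pair with minimal second component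
def pvSel : List ((Int × Int) × Int) → Option ((Int × Int) × Int)
  | [] => none
  | p :: ps =>
    match pvSel ps with
    | none => some p
    | some q => if p.2 ≤ q.2 then some p else some q

lemma pvSel_eq_none_iff (ps : List ((Int × Int) × Int)) : pvSel ps = none ↔ ps = [] := by
  cases ps with
  | nil => simp [pvSel]
  | cons p ps => simp [pvSel]; cases h : pvSel ps <;> simp <;> split <;> simp

lemma pvFoldA_eq (d : List (Int × Int × List Int)) (x0 : List (Int × Int)) (y0 : List Int) :
    d.foldl
      (fun (acc : List (Int × Int) × List Int) spot =>
        let length : Int := (spot.2.2.length : Int)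
        if length > 1 then (acc.1 ++ [(spot.1, spot.2.1)], acc.2 ++ [length]) else acc)
      (x0, y0)
    = (x0 ++ (pvPairs d).map Prod.fst, y0 ++ (pvPairs d).map Prod.snd) := by
  induction d generalizing x0 y0 with
  | nil => simp [pvPairs]
  | cons e t ih =>
    by_cases h : (1:Int) < (e.2.2.length : Int)
    · have h' : 1 < e.2.2.length := by exact_mod_cast h
      simp only [List.foldl_cons, if_pos h, ih]
      simp [pvPairs, List.filter_cons, h']
    · have h' : ¬ 1 < e.2.2.length := by exact_mod_cast h
      simp only [List.foldl_cons, gt_iff_lt, if_neg h, ih]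
      simp [pvPairs, List.filter_cons, h']

lemma pvA_sel (ps : List ((Int × Int) × Int)) :
    ((match PySem.List.min? (ps.map Prod.snd) (fun v => v) with
      | none => none
      | some m =>
        match PySem.List.index? (ps.map Prod.snd) m with
        | none => none
        | some index => PySem.List.pyGet? (ps.map Prod.fst) (index : Int))
      = (pvSel ps).map Prod.fst)
    ∧ (∀ q, pvSel ps = some q → PySem.List.min? (ps.map Prod.snd) (fun v => v) = some q.2) := by
  induction ps with
  | nil =>
    refine ⟨by simp [PySem.List.min?, pvSel], ?_⟩
    intro q hq; simp [pvSel] at hq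
  | cons p ps ih =>
    cases hsel : pvSel ps with
    | none =>
      have hnil : ps = [] := (pvSel_eq_none_iff ps).mp hsel
      subst hnil
      constructor
      · simp [pvSel, PySem.List.min?, PySem.List.index?, PySem.List.pyGet?, PySem.List.pyIdx?]
      · intro q hq
        simp [pvSel] at hq
        simp [PySem.List.min?, ← hq]
    | some q =>
      have hmin : PySem.List.min? (ps.map Prod.snd) (fun v => v) = some q.2 := ih.2 q hsel
      have hps : ps ≠ [] := by
        intro h; subst h; simp [pvSel] at hsel
      obtain ⟨v, vt, hvt⟩ : ∃ v vt, ps.map Prod.snd = v :: vt := by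
        cases ps with
        | nil => exact absurd rfl hps
        | cons a t => exact ⟨a.2, t.map Prod.snd, rfl⟩
      have hfold : vt.foldl min v = q.2 := by
        have := hmin
        rw [hvt, PySem.List.min?_id_cons] at this
        simpa using this
      have hminc : PySem.List.min? (p.2 :: ps.map Prod.snd) (fun v => v) = some (min p.2 q.2) := by
        rw [hvt, PySem.List.min?_id_cons]
        have : (v :: vt).foldl min p.2 = min p.2 (vt.foldl min v) := by
          simp only [List.foldl_cons]
          exact List.foldl_assoc
        rw [this, hfold]
      by_cases hle : p.2 ≤ q.2
      · have hm : min p.2 q.2 = p.2 := min_eq_left hle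
        constructor
        · simp only [List.map_cons, hminc, hm, PySem.List.index?_cons_self]
          simp [pvSel, hsel, hle, PySem.List.pyGet?, PySem.List.pyIdx?]
        · intro r hr
          simp only [pvSel, hsel, if_pos hle, Option.some.injEq] at hr
          simp only [List.map_cons, hminc, hm, ← hr]
      · have hm : min p.2 q.2 = q.2 := min_eq_right (le_of_not_ge hle)
        have hne : p.2 ≠ q.2 := fun h => hle (le_of_eq h)
        -- extract the index from the IH's first conjunct
        have hmem : q.2 ∈ ps.map Prod.snd := PySem.List.min?_mem hmin
        obtain ⟨i, hi⟩ : ∃ i, PySem.List.index? (ps.map Prod.snd) q.2 = some i := by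
          have := (PySem.List.index?_isSome_iff (xs := ps.map Prod.snd) (v := q.2)).mpr hmem
          exact Option.isSome_iff_exists.mp this
        have hget : PySem.List.pyGet? (ps.map Prod.fst) (i : Int) = some q.1 := by
          have h1 := ih.1
          simp only [hmin, hi, hsel, Option.map_some] at h1
          exact h1
        constructor
        · simp only [List.map_cons, hminc, hm]
          rw [PySem.List.index?_cons_of_ne _ hne, hi]
          simp only [Option.map_some]
          have : ((i + 1 : Nat) : Int) = (i : Int) + 1 := by push_cast; ring
          rw [this, PySem.List.pyGet?_cons_succ, hget]
          simp [pvSel, hsel, hle]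
        · intro r hr
          simp only [pvSel, hsel] at hr
          rw [if_neg hle] at hr
          obtain rfl := Option.some.inj hr
          simp only [List.map_cons, hminc, hm]

lemma pvA_eq_sel (d : List (Int × Int × List Int)) :
    find_spot_with_multiple_candidates d = (pvSel (pvPairs d)).map Prod.fst := by
  unfold find_spot_with_multiple_candidates
  rw [pvFoldA_eq]
  simp only [List.nil_append]
  by_cases h : pvPairs d = []
  · simp [h, pvSel]
  · rw [if_neg (by simp [h])]
    exact (pvA_sel (pvPairs d)).1

def pvStep (a : Option ((Int × Int) × Int)) (p : (Int × Int) × Int) : Option ((Int × Int) × Int) :=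
  match a with
  | none => some p
  | some q => if p.2 < q.2 then some p else a

lemma pvFoldB_eq (d : List (Int × Int × List Int)) (a : Option ((Int × Int) × Int)) :
    d.foldl
      (fun (best : Option ((Int × Int) × Int)) spot =>
        let length : Int := (spot.2.2.length : Int)
        if length ≤ 1 then best
        else
          match best with
          | none => some ((spot.1, spot.2.1), length)
          | some b => if length < b.2 then some ((spot.1, spot.2.1), length) else best)
      a
    = (pvPairs d).foldl pvStep a := by
  induction d generalizing a with
  | nil => simp [pvPairs]
  | cons e t ih =>
    by_cases h : (1:Int) < (e.2.2.length : Int)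
    · have h' : 1 < e.2.2.length := by exact_mod_cast h
      simp only [List.foldl_cons, if_neg (not_le.mpr h), ih]
      simp [pvPairs, List.filter_cons, h', pvStep]
    · have h' : ¬ 1 < e.2.2.length := by exact_mod_cast h
      simp only [List.foldl_cons, if_pos (not_lt.mp h), ih]
      simp [pvPairs, List.filter_cons, h']

lemma pvFoldStep_some (ps : List ((Int × Int) × Int)) (a : (Int × Int) × Int) :
    ps.foldl pvStep (some a)
    = match pvSel ps with
      | none => some a
      | some q => if q.2 < a.2 then some q else some a := by
  induction ps generalizing a with
  | nil => simp [pvSel]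
  | cons p ps ih =>
    simp only [List.foldl_cons, pvStep]
    by_cases h : p.2 < a.2
    · rw [if_pos h, ih]
      cases hsel : pvSel ps with
      | none => simp [pvSel, hsel, h]
      | some q =>
        simp only [pvSel, hsel]
        split_ifs with h1 h2 h3 <;> simp_all <;> omega
    · rw [if_neg h, ih]
      cases hsel : pvSel ps with
      | none => simp [pvSel, hsel, h]
      | some q =>
        simp only [pvSel, hsel]
        split_ifs with h1 h2 h3 <;> simp_all <;> omega

lemma pvFoldStep_none (ps : List ((Int × Int) × Int)) :
    ps.foldl pvStep none = pvSel ps := by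
  cases ps with
  | nil => simp [pvSel]
  | cons p ps =>
    simp only [List.foldl_cons, pvStep, pvFoldStep_some]
    cases hsel : pvSel ps with
    | none => simp [pvSel, hsel]
    | some q =>
      simp only [pvSel, hsel]
      split_ifs <;> first | rfl | omega

lemma pvB_eq_sel (d : List (Int × Int × List Int)) :
    find_spot_with_multiple_candidates_alt d = (pvSel (pvPairs d)).map Prod.fst := by
  unfold find_spot_with_multiple_candidates_alt
  rw [pvFoldB_eq, pvFoldStep_none]

-- ===== VERDICT (by name: the statement is the Claim_ definition above) =====
theorem find_spot_with_multiple_candidates_spec : Claim_equal_find_spot_with_multiple_candidates := by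
  intro d _
  unfold Spec_find_spot_with_multiple_candidates
  rw [pvA_eq_sel, pvB_eq_sel]
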